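-- pv_equiv track=rewrite | github.com/oswaltryan/drive-qual-automation | scripts/dev/macos_ui/run_blackmagic_benchmark.py | _inventory_candidate_count
-- ===== SOURCE A (Python) =====
-- def _inventory_candidate_count(inventory_result: str) -> int:
--     for segment in inventory_result.split(";"):
--         if segment.startswith("count="):
--             _, raw_value = segment.split("=", maxsplit=1)
--             try:
--                 return int(raw_value)
--             except ValueError:
--                 return 0
--     return 0
-- ===== SOURCE B (Python) =====
-- def _inventory_candidate_count(inventory_result: str) -> int:
--     s = ";" + inventory_result
--     i = s.find(";count=")
--     if i == -1:
--         return 0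
--     j = s.find(";", i + 7)
--     raw = s[i + 7:] if j == -1 else s[i + 7:j]
--     try:
--         return int(raw)
--     except ValueError:
--         return 0
-- ===== Notes on version B (the rewrite author's own statement) =====
-- stated objective: alternative
-- what changed: B prepends ';' and locates the first ';count=' by a single substring search (then one more find for the terminating ';'), instead of splitting the string into a list of segments and scanning them with startswith.
import Mathlib
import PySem

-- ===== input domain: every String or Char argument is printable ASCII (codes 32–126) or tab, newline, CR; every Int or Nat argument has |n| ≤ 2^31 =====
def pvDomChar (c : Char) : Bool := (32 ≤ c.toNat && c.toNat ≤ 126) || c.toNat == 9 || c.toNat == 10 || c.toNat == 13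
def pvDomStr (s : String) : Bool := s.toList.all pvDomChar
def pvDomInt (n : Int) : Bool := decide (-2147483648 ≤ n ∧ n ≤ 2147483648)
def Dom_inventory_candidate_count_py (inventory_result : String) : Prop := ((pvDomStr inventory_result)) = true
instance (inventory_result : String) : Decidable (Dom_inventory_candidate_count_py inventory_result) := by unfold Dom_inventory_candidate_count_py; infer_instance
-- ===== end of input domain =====

-- B replaces A's split-into-segments scan by a single substring search for ";count=" in ";"+s (alternative algorithm, no segment list built).


-- ===== PORT A =====
-- for segment in inventory_result.split(";"): if segment.startswith("count="): _, raw = segment.split("=",1); try int(raw) except → 0; else 0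
def pvLoopA : List (List Char) → Int
  | [] => 0
  | seg :: segs =>
    if PySem.Chars.startswith seg ['c','o','u','n','t','='] then
      match PySem.Chars.splitOnMax seg ['='] 1 with
      | [_, raw_value] =>
        match PySem.Int.ofChars? raw_value with
        | some n => n
        | none => 0
      | _ => 0  -- unreachable: a segment starting with "count=" splits into exactly two parts
    else pvLoopA segs

def inventory_candidate_count_py (inventory_result : String) : Int :=
  pvLoopA (PySem.Chars.splitOn inventory_result.toList [';'])

-- ===== PORT B =====
-- s = ";" + inventory_result; i = s.find(";count="); if -1 → 0; j = s.find(";", i+7); raw = s[i+7:] / s[i+7:j]; try int(raw) except → 0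
def pvCoreB (s : List Char) : Int :=
  let i := PySem.Chars.find s [';','c','o','u','n','t','=']
  if i = -1 then 0
  else
    let j := PySem.Chars.findFrom s [';'] (i + 7) none
    let raw := if j = -1 then PySem.List.slice s (some (i + 7)) none
               else PySem.List.slice s (some (i + 7)) (some j)
    match PySem.Int.ofChars? raw with
    | some n => n
    | none => 0

def inventory_candidate_count_py_alt (inventory_result : String) : Int :=
  pvCoreB (';' :: inventory_result.toList)

-- ===== PRECONDITION & SPEC =====
def Spec_inventory_candidate_count_py (inventory_result : String) (out : Int) : Prop := out = inventory_candidate_count_py_alt inventory_result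
instance (inventory_result : String) (out : Int) : Decidable (Spec_inventory_candidate_count_py inventory_result out) := by unfold Spec_inventory_candidate_count_py; infer_instance

-- ===== CLAIM (what is proved, stated in full; the proofs are below) =====
def Claim_equal_inventory_candidate_count_py : Prop := ∀ (inventory_result : String), Dom_inventory_candidate_count_py inventory_result → Spec_inventory_candidate_count_py inventory_result (inventory_candidate_count_py inventory_result)

-- ===== LEMMAS AND PROOFS =====

def pvSp : List Char → List (List Char)
  | [] => [[]]
  | c :: rest =>
    if c = ';' then [] :: pvSp rest
    else match pvSp rest with
         | s :: ss => (c :: s) :: ss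
         | [] => [[c]]

theorem pv_modifyHead_id {α : Type} (l : List α) : List.modifyHead (fun x => x) l = l := by
  cases l <;> simp

theorem pvSp_ne_nil (cs : List Char) : pvSp cs ≠ [] := by
  cases cs with
  | nil => simp [pvSp]
  | cons c rest =>
    simp only [pvSp]
    split
    · simp
    · split <;> simp

theorem pv_go_eq (l : List Char) : ∀ (fuel : Nat) (cur : List Char) (acc : List (List Char)),
    l.length < fuel →
    PySem.Chars.splitOn.go [';'] fuel l cur acc
      = acc.reverse ++ (pvSp l).modifyHead (cur.reverse ++ ·) := by
  induction l with
  | nil =>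
    intro fuel cur acc hf
    match fuel with
    | fuel + 1 => simp [PySem.Chars.splitOn.go, pvSp]
  | cons c rest ih =>
    intro fuel cur acc hf
    match fuel with
    | fuel + 1 =>
      have hf' : rest.length < fuel := by simpa using hf
      by_cases hc : c = ';'
      · subst hc
        rw [show PySem.Chars.splitOn.go [';'] (fuel+1) (';' :: rest) cur acc
              = PySem.Chars.splitOn.go [';'] fuel rest [] (cur.reverse :: acc) from by
              simp [PySem.Chars.splitOn.go, List.isPrefixOf]]
        rw [ih fuel [] (cur.reverse :: acc) hf']
        simp [pvSp, pv_modifyHead_id]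
      · have hc' : ([';'].isPrefixOf (c :: rest)) = false := by
          simp [List.isPrefixOf, Ne.symm hc]
        rw [show PySem.Chars.splitOn.go [';'] (fuel+1) (c :: rest) cur acc
              = PySem.Chars.splitOn.go [';'] fuel rest (c :: cur) acc from by
              simp [PySem.Chars.splitOn.go, hc']]
        rw [ih fuel (c :: cur) acc hf']
        simp only [pvSp, if_neg hc]
        cases hsp : pvSp rest with
        | nil => exact absurd hsp (pvSp_ne_nil rest)
        | cons s ss => simp

theorem pv_splitOn_eq_sp (cs : List Char) : PySem.Chars.splitOn cs [';'] = pvSp cs := by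
  rw [PySem.Chars.splitOn, pv_go_eq cs (cs.length + 1) [] [] (by omega)]
  cases hsp : pvSp cs with
  | nil => exact absurd hsp (pvSp_ne_nil cs)
  | cons s ss => simp

theorem pvSp_no_semi {cs : List Char} (h : ';' ∉ cs) : pvSp cs = [cs] := by
  induction cs with
  | nil => rfl
  | cons c rest ih =>
    simp only [List.mem_cons, not_or] at h
    have hc : ¬ c = ';' := fun e => h.1 e.symm
    simp only [pvSp, if_neg hc, ih h.2]

theorem pvSp_append {h : List Char} (hn : ';' ∉ h) (rest : List Char) :
    pvSp (h ++ ';' :: rest) = h :: pvSp rest := by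
  induction h with
  | nil => simp [pvSp]
  | cons c t ih =>
    simp only [List.mem_cons, not_or] at hn
    have hc : ¬ c = ';' := fun e => hn.1 e.symm
    simp only [List.cons_append, pvSp, if_neg hc, ih hn.2]

def pvInt0 (cs : List Char) : Int :=
  match PySem.Int.ofChars? cs with
  | some n => n
  | none => 0

theorem pv_goMax_zero (fuel : Nat) (l cur : List Char) (acc : List (List Char)) :
    PySem.Chars.splitOnMax.go ['='] fuel 0 l cur acc = ((cur.reverse ++ l) :: acc).reverse := by
  match fuel, l with
  | 0, l => rfl
  | fuel + 1, [] => simp [PySem.Chars.splitOnMax.go]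
  | fuel + 1, c :: rest => simp [PySem.Chars.splitOnMax.go]

theorem pv_goMax_one (p : List Char) (hp : '=' ∉ p) :
    ∀ (fuel : Nat), p.length < fuel → ∀ (r cur : List Char) (acc : List (List Char)),
    PySem.Chars.splitOnMax.go ['='] fuel 1 (p ++ '=' :: r) cur acc
      = acc.reverse ++ [cur.reverse ++ p, r] := by
  induction p with
  | nil =>
    intro fuel hf r cur acc
    match fuel with
    | fuel + 1 =>
      simp [PySem.Chars.splitOnMax.go, List.isPrefixOf, pv_goMax_zero]
  | cons c t ih =>
    intro fuel hf r cur acc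
    simp only [List.mem_cons, not_or] at hp
    have hc : ¬ '=' = c := hp.1
    match fuel with
    | fuel + 1 =>
      have hf' : t.length < fuel := by simpa using hf
      rw [show PySem.Chars.splitOnMax.go ['='] (fuel+1) 1 ((c :: t) ++ '=' :: r) cur acc
            = PySem.Chars.splitOnMax.go ['='] fuel 1 (t ++ '=' :: r) (c :: cur) acc from by
            simp [PySem.Chars.splitOnMax.go, List.isPrefixOf, hc]]
      rw [ih hp.2 fuel hf' r (c :: cur) acc]
      simp

theorem pv_splitOnMax_eq (p r : List Char) (hp : '=' ∉ p) :
    PySem.Chars.splitOnMax (p ++ '=' :: r) ['='] 1 = [p, r] := by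
  rw [PySem.Chars.splitOnMax]
  norm_num
  rw [pv_goMax_one p hp (p.length + (r.length + 1) + 1) (by omega) r [] []]
  simp

theorem pv_find_eq {s sub : List Char} (m : Nat) (hm : sub <+: List.drop m s)
    (hmin : ∀ i, i < m → ¬ sub <+: List.drop i s) : PySem.Chars.find s sub = (m : Int) := by
  have hinfix : sub <:+: s := by
    obtain ⟨u, hu⟩ := hm
    exact ⟨List.take m s, u, by rw [List.append_assoc, hu, List.take_append_drop]⟩
  have hpos : 0 ≤ PySem.Chars.find s sub := (PySem.Chars.find_nonneg_iff s sub).mpr hinfix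
  obtain ⟨h1, h2⟩ := PySem.Chars.find_spec hpos
  have ht : (PySem.Chars.find s sub).toNat = m := by
    rcases lt_trichotomy (PySem.Chars.find s sub).toNat m with h | h | h
    · exact absurd h1 (hmin _ h)
    · exact h
    · exact absurd hm (h2 m h)
  omega

theorem pv_find_none {s sub : List Char} (h : ∀ i, ¬ sub <+: List.drop i s) :
    PySem.Chars.find s sub = -1 := by
  rw [PySem.Chars.find_eq_neg_one_iff]
  intro hinf
  obtain ⟨j, hj⟩ := (PySem.Chars.exists_prefix_drop_iff_isIn sub s).mpr
    ((PySem.Chars.isIn_iff_infix sub s).mpr hinf)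
  exact h j hj

-- a prefix starting with ';' cannot start inside the ';'-free block h
theorem pv_no_semi_prefix {h : List Char} (hn : ';' ∉ h) {l : List Char} {j : Nat}
    (hj : j < h.length) (x : List Char) : ¬ (';' :: x) <+: List.drop j (h ++ l) := by
  intro hp
  rw [List.drop_append_of_le_length (le_of_lt hj), List.drop_eq_getElem_cons hj,
      List.cons_append, List.cons_prefix_cons] at hp
  exact hn (hp.1 ▸ List.getElem_mem hj)

def pvK : List Char := ['c','o','u','n','t','=']

-- "count=" is not a prefix of h ++ ';' :: rest when it is not a prefix of h
theorem pv_noK {h : List Char} (hk : ¬ pvK <+: h) (rest : List Char) :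
    ¬ pvK <+: (h ++ ';' :: rest) := by
  intro hp
  by_cases hlen : 6 ≤ h.length
  · apply hk
    have heq := List.prefix_iff_eq_take.mp hp
    rw [List.take_append_of_le_length (by simpa [pvK] using hlen)] at heq
    rw [heq]
    exact List.take_prefix _ _
  · have hlt : h.length < pvK.length := by simp [pvK]; omega
    have h2 : h.length < (h ++ ';' :: rest).length := by simp
    have := hp.getElem (i := h.length) hlt
    rw [List.getElem_append_right (le_refl h.length)] at this
    simp at this
    have : ';' ∈ pvK := this ▸ List.getElem_mem hlt
    simp [pvK] at this


theorem pv_SK_eq : [';','c','o','u','n','t','='] = ';' :: pvK := rfl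

-- no match anywhere: B returns 0
theorem pv_LB0 {cs : List Char} (hsem : ';' ∉ cs) (hk : ¬ pvK <+: cs) :
    pvCoreB (';' :: cs) = 0 := by
  have hfind : PySem.Chars.find (';' :: cs) [';','c','o','u','n','t','='] = -1 := by
    apply pv_find_none
    intro i hp
    rw [pv_SK_eq] at hp
    match i with
    | 0 =>
      rw [List.drop_zero, List.cons_prefix_cons] at hp
      exact hk hp.2
    | i + 1 =>
      rw [List.drop_succ_cons] at hp
      obtain ⟨u, hu⟩ := hp
      have hmem : ';' ∈ List.drop i cs := by
        rw [← hu]; exact List.mem_cons_self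
      exact hsem (List.mem_of_mem_drop hmem)
  simp [pvCoreB, hfind]

-- match in the leading block h (';' ∉ h): B returns pvInt0 (h.drop 6); tl is either [] (last segment) or ';' :: rest
theorem pv_LB_match {h : List Char} (hn : ';' ∉ h) (hk : pvK <+: h) (tl : List Char)
    (htl : tl = [] ∨ ∃ rest, tl = ';' :: rest) :
    pvCoreB (';' :: (h ++ tl)) = pvInt0 (List.drop 6 h) := by
  obtain ⟨u, hu⟩ := hk
  have hlen6 : 6 ≤ h.length := by
    have := congrArg List.length hu
    simp [pvK] at this
    omega
  have hfind : PySem.Chars.find (';' :: (h ++ tl)) [';','c','o','u','n','t','='] = (0 : Int) := by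
    apply pv_find_eq 0
    · rw [List.drop_zero, pv_SK_eq, List.cons_prefix_cons]
      exact ⟨rfl, ⟨u ++ tl, by rw [← List.append_assoc, hu]⟩⟩
    · intro i hi
      omega
  have hdrop7 : List.drop 7 (';' :: (h ++ tl)) = List.drop 6 h ++ tl := by
    rw [List.drop_succ_cons, List.drop_append_of_le_length hlen6]
  have hn6 : ';' ∉ List.drop 6 h := fun hm => hn (List.mem_of_mem_drop hm)
  have hlen2 : (List.drop 6 h).length = h.length - 6 := by simp
  -- the inner find: first ';' after position 7
  have hinner : PySem.Chars.find (List.drop 6 h ++ tl) [';']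
      = if tl = [] then -1 else ((h.length - 6 : Nat) : Int) := by
    rcases htl with rfl | ⟨rest, rfl⟩
    · simp only [if_pos rfl]
      apply pv_find_none
      intro i hp
      obtain ⟨u', hu'⟩ := hp
      simp only [List.append_nil] at hu'
      have hmem : ';' ∈ List.drop i (List.drop 6 h) := by
        rw [← hu']; exact List.mem_cons_self
      exact hn6 (List.mem_of_mem_drop hmem)
    · simp only [if_neg (List.cons_ne_nil ';' rest)]
      apply pv_find_eq (h.length - 6)
      · rw [← hlen2, List.drop_append_of_le_length (le_refl _), List.drop_length]
        exact ⟨rest, rfl⟩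
      · intro i hi
        exact pv_no_semi_prefix hn6 (by omega) []
  have h07 : ((0:Int) + 7) = ((7:Nat) : Int) := by norm_num
  have hlen7 : 7 ≤ (';' :: (h ++ tl)).length := by simp; omega
  rcases htl with rfl | ⟨rest, rfl⟩
  · have hi1 : PySem.Chars.find (List.drop 6 h ++ ([] : List Char)) [';'] = -1 := by
      simpa using hinner
    have hff : PySem.Chars.findFrom (';' :: (h ++ ([] : List Char))) [';'] ((0:Int) + 7) none = -1 := by
      rw [h07, PySem.Chars.findFrom_natCast _ _ 7 hlen7, hdrop7, hi1]
      simp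
    simp only [pvCoreB, hfind, hff, if_neg (show ¬ (0:Int) = -1 by norm_num), if_pos rfl]
    rw [h07, PySem.List.slice_from_natCast, hdrop7, List.append_nil]
    rfl
  · have hi2 : PySem.Chars.find (List.drop 6 h ++ ';' :: rest) [';'] = ((h.length - 6 : Nat) : Int) := by
      simpa using hinner
    have hcast : ((7:Nat) : Int) + ((h.length - 6 : Nat) : Int) = ((h.length + 1 : Nat) : Int) := by
      omega
    have hff : PySem.Chars.findFrom (';' :: (h ++ ';' :: rest)) [';'] ((0:Int) + 7) none
        = ((h.length + 1 : Nat) : Int) := by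
      rw [h07, PySem.Chars.findFrom_natCast _ _ 7 hlen7, hdrop7, hi2]
      rw [if_neg (by omega)]
      exact hcast
    simp only [pvCoreB, hfind, hff, if_neg (show ¬ (0:Int) = -1 by norm_num),
      if_neg (show ¬ ((h.length + 1 : Nat) : Int) = -1 by omega)]
    rw [h07, PySem.List.slice_natCast, hdrop7]
    rw [show h.length + 1 - 7 = h.length - 6 by omega]
    rw [← hlen2, List.take_append_of_le_length (le_refl _), List.take_length]
    rfl

-- no match in the leading block: B's search result is unchanged after skipping "h ;"
set_option maxHeartbeats 1000000 in
theorem pv_LB_shift {h : List Char} (hn : ';' ∉ h) (hk : ¬ pvK <+: h) (rest : List Char) :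
    pvCoreB (';' :: (h ++ ';' :: rest)) = pvCoreB (';' :: rest) := by
  set t := ';' :: (h ++ ';' :: rest) with ht
  set t' := ';' :: rest with ht'
  set m := h.length + 1 with hm
  have hdropT : ∀ i : Nat, List.drop (m + i) t = List.drop i t' := by
    intro i
    have h1 : t = (';' :: h) ++ t' := by simp [ht, ht']
    have h2 : List.drop m ((';' :: h) ++ t') = t' := by
      rw [show m = (';' :: h).length from by simp [hm]]
      exact List.drop_left
    rw [h1, ← List.drop_drop, h2]
  have hnoPre : ∀ j, j < m → ¬ [';','c','o','u','n','t','='] <+: List.drop j t := by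
    intro j hj hp
    rw [pv_SK_eq] at hp
    match j with
    | 0 =>
      rw [List.drop_zero, ht, List.cons_prefix_cons] at hp
      exact pv_noK hk rest hp.2
    | j + 1 =>
      rw [ht, List.drop_succ_cons] at hp
      exact pv_no_semi_prefix hn (l := ';' :: rest) (by omega) pvK hp
  by_cases hf1 : PySem.Chars.find t' [';','c','o','u','n','t','='] = -1
  · have hf0 : PySem.Chars.find t [';','c','o','u','n','t','='] = -1 := by
      apply pv_find_none
      intro i hp
      by_cases hi : i < m
      · exact hnoPre i hi hp
      · have : [';','c','o','u','n','t','='] <+: List.drop (i - m) t' := by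
          rw [← hdropT (i - m), show m + (i - m) = i from by omega]
          exact hp
        have hinf : [';','c','o','u','n','t','='] <:+: t' :=
          (PySem.Chars.isIn_iff_infix _ _).mp
            ((PySem.Chars.exists_prefix_drop_iff_isIn _ _).mp ⟨i - m, this⟩)
        exact (PySem.Chars.find_eq_neg_one_iff _ _).mp hf1 hinf
    simp [pvCoreB, hf0, hf1]
  · have hpos : 0 ≤ PySem.Chars.find t' [';','c','o','u','n','t','='] := by
      rcases (PySem.Chars.neg_one_le_find t' [';','c','o','u','n','t','=']).lt_or_eq with hlt | heq
      · omega
      · exact absurd heq.symm hf1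
    obtain ⟨hpre, hmin⟩ := PySem.Chars.find_spec hpos
    set f := (PySem.Chars.find t' [';','c','o','u','n','t','=']).toNat with hfdef
    have hfv : PySem.Chars.find t' [';','c','o','u','n','t','='] = (f : Int) := by omega
    have hf0 : PySem.Chars.find t [';','c','o','u','n','t','='] = ((m + f : Nat) : Int) := by
      apply pv_find_eq (m + f)
      · rw [hdropT f]; exact hpre
      · intro i hi
        by_cases him : i < m
        · exact hnoPre i him
        · intro hp
          apply hmin (i - m) (by omega)
          rw [← hdropT (i - m), show m + (i - m) = i from by omega]
          exact hp
    -- lengths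
    have hlenpre := hpre.length_le
    have hlent' : t'.length = 1 + rest.length := by simp [ht']; omega
    have hlenf : f + 7 ≤ t'.length := by
      have : (List.drop f t').length = t'.length - f := by simp
      simp only [List.length_cons] at hlenpre
      omega
    have hlent : t.length = m + t'.length := by simp [ht, ht', hm]; omega
    -- the two findFroms look at the same suffix
    have hsuffix : List.drop (m + f + 7) t = List.drop (f + 7) t' := by
      rw [show m + f + 7 = m + (f + 7) from by omega, hdropT]
    have hcast1 : ((m + f : Nat) : Int) + 7 = ((m + f + 7 : Nat) : Int) := by omega
    have hcast2 : ((f : Nat) : Int) + 7 = ((f + 7 : Nat) : Int) := by omega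
    have hffT := PySem.Chars.findFrom_natCast t [';'] (m + f + 7) (by omega)
    have hffT' := PySem.Chars.findFrom_natCast t' [';'] (f + 7) (by omega)
    rw [hsuffix] at hffT
    set g := PySem.Chars.find (List.drop (f + 7) t') [';'] with hgdef
    by_cases hg : g = -1
    · -- no later ';': both take the tail
      simp only [pvCoreB, hf0, hfv, if_neg (show ¬ ((m + f : Nat) : Int) = -1 by omega),
        if_neg (show ¬ ((f : Nat) : Int) = -1 by omega), hcast1, hcast2, hffT, hffT',
        if_pos hg, if_pos rfl, if_true]
      rw [PySem.List.slice_from_natCast, PySem.List.slice_from_natCast, hsuffix]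
    · have hgpos : 0 ≤ g := by
        rcases (PySem.Chars.neg_one_le_find (List.drop (f + 7) t') [';']).lt_or_eq with hlt | heq
        · omega
        · exact absurd heq.symm hg
      obtain ⟨gn, hgv⟩ : ∃ n : Nat, g = (n : Int) := ⟨g.toNat, by omega⟩
      simp only [pvCoreB, hf0, hfv, if_neg (show ¬ ((m + f : Nat) : Int) = -1 by omega),
        if_neg (show ¬ ((f : Nat) : Int) = -1 by omega), hcast1, hcast2, hffT, hffT',
        if_neg hg, hgv, if_neg (show ¬ ((gn : Nat) : Int) = -1 by omega)]
      rw [if_neg (show ¬ ((m + f + 7 : Nat) : Int) + (gn : Int) = -1 by omega),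
          if_neg (show ¬ ((f + 7 : Nat) : Int) + (gn : Int) = -1 by omega)]
      rw [show ((m + f + 7 : Nat) : Int) + (gn : Int) = ((m + f + 7 + gn : Nat) : Int) from by omega,
          show ((f + 7 : Nat) : Int) + (gn : Int) = ((f + 7 + gn : Nat) : Int) from by omega]
      rw [PySem.List.slice_natCast, PySem.List.slice_natCast, hsuffix,
          show m + f + 7 + gn - (m + f + 7) = gn from by omega,
          show f + 7 + gn - (f + 7) = gn from by omega]


theorem pv_loopA_match {seg : List Char} (hk : pvK <+: seg) (segs : List (List Char)) :
    pvLoopA (seg :: segs) = pvInt0 (List.drop 6 seg) := by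
  obtain ⟨u, hu⟩ := hk
  have hsw : PySem.Chars.startswith seg ['c','o','u','n','t','='] = true := by
    rw [PySem.Chars.startswith]
    exact List.isPrefixOf_iff_prefix.mpr ⟨u, hu⟩
  have hseg : seg = ['c','o','u','n','t'] ++ '=' :: u := by rw [← hu]; rfl
  have hdrop : List.drop 6 seg = u := by rw [← hu]; rfl
  simp only [pvLoopA, hsw, if_true]
  rw [hseg, pv_splitOnMax_eq ['c','o','u','n','t'] u (by decide)]
  rfl

theorem pv_loopA_skip {seg : List Char} (hk : ¬ pvK <+: seg) (segs : List (List Char)) :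
    pvLoopA (seg :: segs) = pvLoopA segs := by
  have hsw : PySem.Chars.startswith seg ['c','o','u','n','t','='] = false := by
    rw [PySem.Chars.startswith]
    rw [show (['c','o','u','n','t','='] : List Char) = pvK from rfl]
    exact Bool.eq_false_iff.mpr (fun hb => hk (List.isPrefixOf_iff_prefix.mp hb))
  simp only [pvLoopA, hsw, Bool.false_eq_true, if_false]

theorem pv_main_aux : ∀ (n : Nat) (cs : List Char), cs.length ≤ n →
    pvLoopA (pvSp cs) = pvCoreB (';' :: cs) := by
  intro n
  induction n with
  | zero =>
    intro cs hlen
    have hnil : cs = [] := List.eq_nil_of_length_eq_zero (by omega)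
    subst hnil
    rw [show pvSp [] = [[]] from rfl, pv_loopA_skip (by decide) [],
        show pvLoopA [] = 0 from rfl]
    exact (pv_LB0 (by simp) (by decide)).symm
  | succ n ih =>
    intro cs hlen
    by_cases hsem : ';' ∈ cs
    · have hdw : cs.dropWhile (fun c => c ≠ ';') ≠ [] := by
        rw [Ne, List.dropWhile_eq_nil_iff]
        push_neg
        exact ⟨';', hsem, by simp⟩
      obtain ⟨d, tl, hdt⟩ : ∃ d tl, cs.dropWhile (fun c => c ≠ ';') = d :: tl := by
        cases hcase : cs.dropWhile (fun c => c ≠ ';') with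
        | nil => exact absurd hcase hdw
        | cons d tl => exact ⟨d, tl, rfl⟩
      have hd : d = ';' := by
        have hhd := List.head_dropWhile_not (fun c => decide (c ≠ ';')) hdw
        have h1 : (List.dropWhile (fun c => decide (c ≠ ';')) cs).head? = some d := by
          rw [hdt]; rfl
        rw [List.head?_eq_head hdw] at h1
        rw [Option.some_inj.mp h1] at hhd
        simpa using hhd
      have hcs : cs = cs.takeWhile (fun c => c ≠ ';') ++ ';' :: tl := by
        conv_lhs => rw [← List.takeWhile_append_dropWhile (p := fun c => decide (c ≠ ';')) (l := cs)]
        rw [hdt, hd]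
      have hn : ';' ∉ cs.takeWhile (fun c => c ≠ ';') := by
        intro hm
        have := List.mem_takeWhile_imp hm
        simp at this
      have htl : tl.length ≤ n := by
        have := congrArg List.length hcs
        simp at this
        omega
      rw [hcs, pvSp_append hn]
      by_cases hk : pvK <+: cs.takeWhile (fun c => c ≠ ';')
      · rw [pv_loopA_match hk, pv_LB_match hn hk (';' :: tl) (Or.inr ⟨tl, rfl⟩)]
      · rw [pv_loopA_skip hk, ih tl htl, pv_LB_shift hn hk tl]
    · rw [pvSp_no_semi hsem]
      by_cases hk : pvK <+: cs
      · have hmatch := pv_LB_match hsem hk [] (Or.inl rfl)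
        rw [List.append_nil] at hmatch
        rw [pv_loopA_match hk, hmatch]
      · rw [pv_loopA_skip hk, show pvLoopA [] = 0 from rfl]
        exact (pv_LB0 hsem hk).symm

theorem pv_main (cs : List Char) :
    pvLoopA (PySem.Chars.splitOn cs [';']) = pvCoreB (';' :: cs) := by
  rw [pv_splitOn_eq_sp]
  exact pv_main_aux cs.length cs (le_refl _)

-- ===== VERDICT (by name: the statement is the Claim_ definition above) =====
theorem inventory_candidate_count_py_spec : Claim_equal_inventory_candidate_count_py := by
  intro s _
  unfold Spec_inventory_candidate_count_py inventory_candidate_count_py inventory_candidate_count_py_alt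
  exact pv_main s.toList
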